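-- pv_equiv track=rewrite | github.com/Fiestaboard/fiestaboard-plugin--disney-parks-times | __init__.py | _tiny_abbr
-- ===== SOURCE A (Python) =====
-- from typing import Any, Dict, List, Optional
--
-- TINY_ABBR_LEN = 5  # Very short abbreviation for compact display
--
-- _KNOWN_TINY_ABBR: List[tuple] = [
--     ("big thunder mountain railroad", "THUND"),
--     ("buzz lightyear", "BUZZ"),
--     ("carousel of progress", "COP"),
--     ("country bear jamboree", "CBJ"),
--     ("expedition everest", "EE"),
--     ("flight of passage", "FOP"),
--     ("frozen ever after", "FRZN"),
--     ("guardians of the galaxy", "GOTG"),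
--     ("haunted mansion", "HM"),
--     ("indiana jones", "INDY"),
--     ("it's a small world", "SMALL"),
--     ("jungle cruise", "JUNGL"),
--     ("kilimanjaro safaris", "KS"),
--     ("living with the land", "LWTL"),
--     ("mickey and minnie's runaway railway", "MMRR"),
--     ("millennium falcon", "MFSR"),
--     ("mission space", "MS"),
--     ("mission: space", "MS"),
--     ("na'vi river journey", "NRJ"),
--     ("navi river journey", "NRJ"),
--     ("peter pan's flight", "PPF"),
--     ("pirates of the caribbean", "POTC"),
--     ("rise of the resistance", "RISE"),
--     ("rock n roller coaster", "RNR"),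
--     ("rock 'n' roller coaster", "RNR"),
--     ("runaway railway", "MMRR"),
--     ("seven dwarfs mine train", "7DMT"),
--     ("small world", "SMALL"),
--     ("soarin", "SOARN"),
--     ("soarin'", "SOARN"),
--     ("space mountain", "SMNT"),
--     ("spaceship earth", "SE"),
--     ("splash mountain", "SPLMT"),
--     ("star tours", "ST"),
--     ("star wars: rise of the resistance", "RISE"),
--     ("test track", "TT"),
--     ("tower of terror", "TOT"),
--     ("toy story mania", "TSMM"),
--     ("toy story midway mania", "TSMM"),
--     ("twilight zone tower of terror", "TOT"),
-- ]
--
-- def _tiny_abbr(name: str, max_len: int = TINY_ABBR_LEN) -> str: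
--     """Very short ride name (max 5 chars); use known abbreviations when possible.
--     Single-rider lines get a trailing '1' so they differ from the main line (e.g. SMNT1 vs SMNT).
--     No spaces in the result; always uppercase for board display.
--     """
--     n = (name or "").strip().lower()
--     if not n:
--         return ""
--     is_single_rider = "single rider" in n
--     match = ""
--     abbr = ""
--     for key_phrase, known in _KNOWN_TINY_ABBR:
--         if key_phrase in n and len(key_phrase) > len(match):
--             match, abbr = key_phrase, known
--     if abbr:
--         base = abbr[:max_len].upper()
--     else:
--         # Fallback: first max_len chars of name, spaces removed, then uppercase for board
--         base = "".join((name or "").strip().split())[:max_len].upper()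
--     if is_single_rider:
--         if len(base) < max_len:
--             base = (base + "1")[:max_len]
--         else:
--             base = base[: max_len - 1] + "1"
--     return base
-- ===== SOURCE B (Python) =====
-- # B: different decomposition — table pre-sorted once by key length (descending, stable) so the
-- # lookup is first-substring-match-wins (early exit via next()); the base string is computed once
-- # by a uniform raw->slice->upper pipeline and the single-rider suffix branch is restructured.
-- from typing import List
--
-- TINY_ABBR_LEN = 5
--
-- _KNOWN_TINY_ABBR: List[tuple] = [
--     ("big thunder mountain railroad", "THUND"),
--     ("buzz lightyear", "BUZZ"),
--     ("carousel of progress", "COP"),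
--     ("country bear jamboree", "CBJ"),
--     ("expedition everest", "EE"),
--     ("flight of passage", "FOP"),
--     ("frozen ever after", "FRZN"),
--     ("guardians of the galaxy", "GOTG"),
--     ("haunted mansion", "HM"),
--     ("indiana jones", "INDY"),
--     ("it's a small world", "SMALL"),
--     ("jungle cruise", "JUNGL"),
--     ("kilimanjaro safaris", "KS"),
--     ("living with the land", "LWTL"),
--     ("mickey and minnie's runaway railway", "MMRR"),
--     ("millennium falcon", "MFSR"),
--     ("mission space", "MS"),
--     ("mission: space", "MS"),
--     ("na'vi river journey", "NRJ"),
--     ("navi river journey", "NRJ"),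
--     ("peter pan's flight", "PPF"),
--     ("pirates of the caribbean", "POTC"),
--     ("rise of the resistance", "RISE"),
--     ("rock n roller coaster", "RNR"),
--     ("rock 'n' roller coaster", "RNR"),
--     ("runaway railway", "MMRR"),
--     ("seven dwarfs mine train", "7DMT"),
--     ("small world", "SMALL"),
--     ("soarin", "SOARN"),
--     ("soarin'", "SOARN"),
--     ("space mountain", "SMNT"),
--     ("spaceship earth", "SE"),
--     ("splash mountain", "SPLMT"),
--     ("star tours", "ST"),
--     ("star wars: rise of the resistance", "RISE"),
--     ("test track", "TT"),
--     ("tower of terror", "TOT"),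
--     ("toy story mania", "TSMM"),
--     ("toy story midway mania", "TSMM"),
--     ("twilight zone tower of terror", "TOT"),
-- ]
--
-- # stable sort: within equal key lengths the original (first-listed) order is kept, so the
-- # first match found below is exactly the earliest-longest match of the original table
-- _SORTED_TINY_ABBR: List[tuple] = sorted(_KNOWN_TINY_ABBR, key=lambda kv: len(kv[0]), reverse=True)
--
-- def _tiny_abbr(name: str, max_len: int = TINY_ABBR_LEN) -> str:
--     stripped = (name or "").strip()
--     n = stripped.lower()
--     if not n:
--         return ""
--     hit = next((abbr for key, abbr in _SORTED_TINY_ABBR if key in n), None)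
--     raw = hit if hit is not None else "".join(stripped.split())
--     base = raw[:max_len].upper()
--     if "single rider" in n:
--         base = base[:max_len - 1] + "1" if len(base) >= max_len else base + "1"
--     return base
-- ===== Notes on version B (the rewrite author's own statement) =====
-- stated objective: alternative
-- what changed: Replaces A's longest-match accumulator scan over the abbreviation table with a table pre-sorted once by key-phrase length descending (stable sort), so the lookup is a first-substring-match scan with early exit, and restructures the body into a single raw->slice->upper base pipeline with the single-rider branch inverted.
import Mathlib
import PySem

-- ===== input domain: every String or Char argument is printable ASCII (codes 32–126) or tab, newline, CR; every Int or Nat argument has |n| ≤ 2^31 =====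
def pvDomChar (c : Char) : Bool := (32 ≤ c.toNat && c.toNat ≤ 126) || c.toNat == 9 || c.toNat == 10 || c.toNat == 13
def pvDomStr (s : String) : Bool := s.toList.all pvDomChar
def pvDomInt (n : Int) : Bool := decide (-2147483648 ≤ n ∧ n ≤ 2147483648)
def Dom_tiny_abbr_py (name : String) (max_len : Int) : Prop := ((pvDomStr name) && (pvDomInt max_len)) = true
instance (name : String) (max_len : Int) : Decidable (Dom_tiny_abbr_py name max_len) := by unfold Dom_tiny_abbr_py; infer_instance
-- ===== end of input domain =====

-- B pre-sorts its abbreviation table once by key length (descending, stable) and takes the FIRST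
-- substring match (early exit), computing the base once through a raw->slice->upper pipeline,
-- instead of A's longest-match accumulator scan with per-branch slicing; same return value.


-- ===== PORT A =====
-- the module constant _KNOWN_TINY_ABBR as A reads it (A's port works on List Char)
def tinyTable : List (List Char × List Char) := [
  ("big thunder mountain railroad".toList, "THUND".toList),
  ("buzz lightyear".toList, "BUZZ".toList),
  ("carousel of progress".toList, "COP".toList),
  ("country bear jamboree".toList, "CBJ".toList),
  ("expedition everest".toList, "EE".toList),
  ("flight of passage".toList, "FOP".toList),
  ("frozen ever after".toList, "FRZN".toList),
  ("guardians of the galaxy".toList, "GOTG".toList),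
  ("haunted mansion".toList, "HM".toList),
  ("indiana jones".toList, "INDY".toList),
  ("it's a small world".toList, "SMALL".toList),
  ("jungle cruise".toList, "JUNGL".toList),
  ("kilimanjaro safaris".toList, "KS".toList),
  ("living with the land".toList, "LWTL".toList),
  ("mickey and minnie's runaway railway".toList, "MMRR".toList),
  ("millennium falcon".toList, "MFSR".toList),
  ("mission space".toList, "MS".toList),
  ("mission: space".toList, "MS".toList),
  ("na'vi river journey".toList, "NRJ".toList),
  ("navi river journey".toList, "NRJ".toList),
  ("peter pan's flight".toList, "PPF".toList),
  ("pirates of the caribbean".toList, "POTC".toList),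
  ("rise of the resistance".toList, "RISE".toList),
  ("rock n roller coaster".toList, "RNR".toList),
  ("rock 'n' roller coaster".toList, "RNR".toList),
  ("runaway railway".toList, "MMRR".toList),
  ("seven dwarfs mine train".toList, "7DMT".toList),
  ("small world".toList, "SMALL".toList),
  ("soarin".toList, "SOARN".toList),
  ("soarin'".toList, "SOARN".toList),
  ("space mountain".toList, "SMNT".toList),
  ("spaceship earth".toList, "SE".toList),
  ("splash mountain".toList, "SPLMT".toList),
  ("star tours".toList, "ST".toList),
  ("star wars: rise of the resistance".toList, "RISE".toList),
  ("test track".toList, "TT".toList),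
  ("tower of terror".toList, "TOT".toList),
  ("toy story mania".toList, "TSMM".toList),
  ("toy story midway mania".toList, "TSMM".toList),
  ("twilight zone tower of terror".toList, "TOT".toList)]

-- A's body: longest-match accumulator scan, per-branch base, then single-rider suffix
def tiny_abbr_py (name : String) (max_len : Int) : String :=
  let n := PySem.Chars.lower (PySem.Chars.strip name.toList)
  if n = [] then ""
  else
    let single := PySem.Chars.isIn ("single rider".toList) n
    let p := tinyTable.foldl
      (fun acc kv =>
        if PySem.Chars.isIn kv.1 n && decide (acc.1.length < kv.1.length) then kv else acc)
      ([], [])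
    let base :=
      if p.2 ≠ [] then PySem.Chars.upper (PySem.Chars.slice p.2 none (some max_len))
      else PySem.Chars.upper (PySem.Chars.slice
        (PySem.Chars.join [] (PySem.Chars.split₀ (PySem.Chars.strip name.toList)))
        none (some max_len))
    let out :=
      if single then
        (if (base.length : Int) < max_len then
          PySem.Chars.slice (base ++ ['1']) none (some max_len)
        else
          PySem.Chars.slice base none (some (max_len - 1)) ++ ['1'])
      else base
    String.ofList out

-- ===== PORT B =====
-- Source B's own module table (string pairs, as Source B holds them)
def tinyTableB : List (String × String) := [
  ("big thunder mountain railroad", "THUND"),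
  ("buzz lightyear", "BUZZ"),
  ("carousel of progress", "COP"),
  ("country bear jamboree", "CBJ"),
  ("expedition everest", "EE"),
  ("flight of passage", "FOP"),
  ("frozen ever after", "FRZN"),
  ("guardians of the galaxy", "GOTG"),
  ("haunted mansion", "HM"),
  ("indiana jones", "INDY"),
  ("it's a small world", "SMALL"),
  ("jungle cruise", "JUNGL"),
  ("kilimanjaro safaris", "KS"),
  ("living with the land", "LWTL"),
  ("mickey and minnie's runaway railway", "MMRR"),
  ("millennium falcon", "MFSR"),
  ("mission space", "MS"),
  ("mission: space", "MS"),
  ("na'vi river journey", "NRJ"),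
  ("navi river journey", "NRJ"),
  ("peter pan's flight", "PPF"),
  ("pirates of the caribbean", "POTC"),
  ("rise of the resistance", "RISE"),
  ("rock n roller coaster", "RNR"),
  ("rock 'n' roller coaster", "RNR"),
  ("runaway railway", "MMRR"),
  ("seven dwarfs mine train", "7DMT"),
  ("small world", "SMALL"),
  ("soarin", "SOARN"),
  ("soarin'", "SOARN"),
  ("space mountain", "SMNT"),
  ("spaceship earth", "SE"),
  ("splash mountain", "SPLMT"),
  ("star tours", "ST"),
  ("star wars: rise of the resistance", "RISE"),
  ("test track", "TT"),
  ("tower of terror", "TOT"),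
  ("toy story mania", "TSMM"),
  ("toy story midway mania", "TSMM"),
  ("twilight zone tower of terror", "TOT")]

-- module-level: _SORTED_TINY_ABBR = sorted(_KNOWN_TINY_ABBR, key=lambda kv: len(kv[0]), reverse=True)
def tinySortedTable : List (String × String) :=
  PySem.List.sorted tinyTableB (fun kv => PySem.Str.len kv.1) true

-- Source B's body: first match in the length-sorted table (next(...) = find?), one base pipeline,
-- restructured single-rider branch.  'base + "1"' is ported as list append under String.ofList
-- (exact: Python str concatenation of ASCII strings).
def tiny_abbr_py_alt (name : String) (max_len : Int) : String :=
  let stripped := PySem.Str.strip name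
  let n := PySem.Str.lower stripped
  if n.toList = [] then ""
  else
    let hit := (tinySortedTable.find? (fun kv => PySem.Str.isIn kv.1 n)).map Prod.snd
    let raw := hit.getD (PySem.Str.join "" (PySem.Str.split₀ stripped))
    let base := PySem.Str.upper (PySem.Str.slice raw none (some max_len))
    if PySem.Str.isIn "single rider" n then
      if max_len ≤ PySem.Str.len base then
        String.ofList ((PySem.Str.slice base none (some (max_len - 1))).toList ++ ['1'])
      else
        String.ofList (base.toList ++ ['1'])
    else base

-- ===== PRECONDITION & SPEC =====
def Spec_tiny_abbr_py (name : String) (max_len : Int) (out : String) : Prop := out = tiny_abbr_py_alt name max_len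
instance (name : String) (max_len : Int) (out : String) : Decidable (Spec_tiny_abbr_py name max_len out) := by unfold Spec_tiny_abbr_py; infer_instance

-- ===== CLAIM (what is proved, stated in full; the proofs are below) =====
def Claim_equal_tiny_abbr_py : Prop := ∀ (name : String) (max_len : Int), Dom_tiny_abbr_py name max_len → Spec_tiny_abbr_py name max_len (tiny_abbr_py name max_len)

-- ===== LEMMAS AND PROOFS =====

-- recursive "earliest longest match" selector (head wins ties): the common spec of both scans
def bestR (P : List Char → Bool) : List (List Char × List Char) → Option (List Char × List Char)
  | [] => none
  | e :: r =>
    let b := bestR P r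
    if P e.1 then
      match b with
      | none => some e
      | some x => if e.1.length < x.1.length then some x else some e
    else b

def tinyCombine (acc : List Char × List Char) :
    Option (List Char × List Char) → List Char × List Char
  | none => acc
  | some b => if acc.1.length < b.1.length then b else acc

lemma bestR_mem {P : List Char → Bool} :
    ∀ {t : List (List Char × List Char)} {b}, bestR P t = some b → b ∈ t := by
  intro t
  induction t with
  | nil => intro b h; simp [bestR] at h
  | cons e r ih =>
    intro b h
    simp only [bestR] at h
    by_cases hp : P e.1
    · simp only [hp, if_true] at h
      cases hb : bestR P r with
      | none => rw [hb] at h; cases h; exact List.mem_cons_self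
      | some x =>
        rw [hb] at h
        by_cases hlt : e.1.length < x.1.length
        · simp only [hlt, if_true] at h
          injection h with h
          exact h ▸ List.mem_cons_of_mem _ (ih hb)
        · simp only [hlt, if_false] at h
          injection h with h
          exact h ▸ List.mem_cons_self
    · simp only [hp] at h
      exact List.mem_cons_of_mem _ (ih h)

-- A's foldl scan computed from bestR
lemma foldl_eq_combine_bestR (P : List Char → Bool) :
    ∀ (t : List (List Char × List Char)) (acc : List Char × List Char),
      t.foldl (fun acc kv => if P kv.1 && decide (acc.1.length < kv.1.length) then kv else acc) acc
        = tinyCombine acc (bestR P t) := by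
  intro t
  induction t with
  | nil => intro acc; simp [tinyCombine, bestR]
  | cons e r ih =>
    intro acc
    simp only [List.foldl_cons, ih, bestR]
    by_cases hp : P e.1
    · simp only [hp, Bool.true_and, if_true]
      cases hb : bestR P r with
      | none =>
        simp only [tinyCombine, decide_eq_true_eq]
      | some x =>
        by_cases h2 : e.1.length < x.1.length <;>
          simp only [tinyCombine, h2, if_true, if_false, decide_eq_true_eq] <;>
            split_ifs <;> first | rfl | omega
    · simp [hp]

-- e is the first length-maximum of t
def firstMax (e : List Char × List Char) : List (List Char × List Char) → Bool
  | [] => false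
  | f :: r =>
    if f = e then r.all (fun x => decide (x.1.length ≤ e.1.length))
    else decide (f.1.length < e.1.length) && firstMax e r

-- removing the first maximum commutes with bestR
lemma bestR_firstMax (P : List Char → Bool) :
    ∀ (t : List (List Char × List Char)) (e), firstMax e t = true →
      bestR P t = if P e.1 then some e else bestR P (t.erase e) := by
  intro t
  induction t with
  | nil => intro e h; simp [firstMax] at h
  | cons f r ih =>
    intro e h
    simp only [firstMax] at h
    by_cases hfe : f = e
    · subst hfe
      rw [if_pos rfl] at h
      simp only [List.all_eq_true, decide_eq_true_eq] at h
      have herase : (f :: r).erase f = r := by simp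
      rw [herase]
      simp only [bestR]
      by_cases hp : P f.1
      · simp only [hp, if_true]
        cases hb : bestR P r with
        | none => rfl
        | some x =>
          have hx := bestR_mem hb
          have hnlt : ¬ f.1.length < x.1.length := Nat.not_lt.mpr (h x hx)
          simp [hnlt]
      · simp [hp]
    · rw [if_neg hfe, Bool.and_eq_true, decide_eq_true_eq] at h
      obtain ⟨hlt, hfm⟩ := h
      have herase : (f :: r).erase e = f :: r.erase e := by
        rw [List.erase_cons_tail]
        simp [hfe]
      rw [herase]
      by_cases hp : P e.1
      · have hr := ih e hfm
        rw [if_pos hp] at hr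
        rw [if_pos hp]
        simp only [bestR, hr]
        by_cases hpf : P f.1 <;> simp [hpf, hlt]
      · have hr := ih e hfm
        rw [if_neg hp] at hr
        rw [if_neg hp]
        simp only [bestR, hr]

-- sorted-vs-original relation: s lists t's elements as successive first maxima
def tinyRel : List (List Char × List Char) → List (List Char × List Char) → Bool
  | [], t => t.isEmpty
  | e :: s', t => firstMax e t && tinyRel s' (t.erase e)

lemma find_eq_bestR (P : List Char → Bool) :
    ∀ (s t : List (List Char × List Char)), tinyRel s t = true →
      s.find? (fun kv => P kv.1) = bestR P t := by
  intro s
  induction s with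
  | nil =>
    intro t h
    simp only [tinyRel] at h
    have : t = [] := List.isEmpty_iff.mp h
    subst this; simp [bestR]
  | cons e s' ih =>
    intro t h
    simp only [tinyRel, Bool.and_eq_true] at h
    rw [bestR_firstMax P t e h.1, List.find?_cons]
    by_cases hp : P e.1
    · simp [hp]
    · simp only [hp, if_false, Bool.false_eq_true]
      simpa [hp] using ih (t.erase e) h.2

-- B's sorted String table, viewed on the char-list side, enumerates tinyTable's first maxima
def tinyToChars (kv : String × String) : List Char × List Char := (kv.1.toList, kv.2.toList)

lemma tinyRel_sorted : tinyRel (tinySortedTable.map tinyToChars) tinyTable = true := by decide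

lemma tinyTable_entries_nonempty :
    ∀ e ∈ tinyTable, e.1 ≠ ([] : List Char) ∧ e.2 ≠ ([] : List Char) := by decide

-- identity slice: xs[:m] = xs when len(xs) <= m
lemma slice_of_len_le (xs : List Char) (m : Int) (h : (xs.length : Int) ≤ m) :
    PySem.Chars.slice xs none (some m) = xs := by
  have h0 : (0:Int) ≤ m := le_trans (by positivity) h
  rw [show PySem.Chars.slice xs none (some m) = PySem.List.slice xs none (some m) from rfl,
    PySem.List.slice_to xs h0]
  exact List.take_of_length_le (by omega)

-- the shared final step (suffix logic), with A's branch shape on the left and B's on the right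
lemma tail_eq (bA : List Char) (bB : String) (hb : bB.toList = bA) (max_len : Int) (single : Bool) :
    String.ofList (if single then
        (if (bA.length : Int) < max_len then
          PySem.Chars.slice (bA ++ ['1']) none (some max_len)
        else
          PySem.Chars.slice bA none (some (max_len - 1)) ++ ['1'])
      else bA)
    = (if single then
        (if max_len ≤ PySem.Str.len bB then
          String.ofList ((PySem.Str.slice bB none (some (max_len - 1))).toList ++ ['1'])
        else
          String.ofList (bB.toList ++ ['1']))
      else bB) := by
  have hlen : PySem.Str.len bB = (bA.length : Int) := by rw [PySem.Str.len_eq, hb]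
  have hslice : (PySem.Str.slice bB none (some (max_len - 1))).toList
      = PySem.Chars.slice bA none (some (max_len - 1)) := by
    simp [pysem, PySem.Str.slice, hb]
  cases single with
  | false => simpa using congrArg String.ofList hb.symm ▸ (hb ▸ String.ofList_toList)
  | true =>
    by_cases hc : (bA.length : Int) < max_len
    · rw [if_pos rfl, if_pos rfl, if_pos hc, if_neg (by rw [hlen]; omega)]
      rw [slice_of_len_le _ _ (by simp; omega), hb]
    · rw [if_pos rfl, if_pos rfl, if_neg hc, if_pos (by rw [hlen]; omega)]
      rw [hslice]

theorem core_eq (name : String) (max_len : Int) :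
    tiny_abbr_py name max_len = tiny_abbr_py_alt name max_len := by
  have hn : (PySem.Str.lower (PySem.Str.strip name)).toList
      = PySem.Chars.lower (PySem.Chars.strip name.toList) := by simp [pysem]
  have hsr : PySem.Str.isIn "single rider" (PySem.Str.lower (PySem.Str.strip name))
      = PySem.Chars.isIn ("single rider".toList)
          (PySem.Chars.lower (PySem.Chars.strip name.toList)) := by
    simp [pysem, PySem.Str.isIn, hn]
  have hjoin : (PySem.Str.join "" (PySem.Str.split₀ (PySem.Str.strip name))).toList
      = PySem.Chars.join [] (PySem.Chars.split₀ (PySem.Chars.strip name.toList)) := by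
    simp [pysem, PySem.Str.join, PySem.Str.split₀]
    rw [show (String.toList ∘ String.ofList) = id from funext fun l => String.toList_ofList]
    simp
  have hq : (fun kv : String × String =>
        PySem.Str.isIn kv.1 (PySem.Str.lower (PySem.Str.strip name)))
      = (fun kv : String × String => PySem.Chars.isIn kv.1.toList
          (PySem.Chars.lower (PySem.Chars.strip name.toList))) := by
    funext kv; simp [pysem, PySem.Str.isIn, hn]
  have hkey : (tinySortedTable.find? (fun kv =>
        PySem.Str.isIn kv.1 (PySem.Str.lower (PySem.Str.strip name)))).map tinyToChars
      = bestR (fun k => PySem.Chars.isIn k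
          (PySem.Chars.lower (PySem.Chars.strip name.toList))) tinyTable := by
    rw [hq, ← find_eq_bestR _ _ _ tinyRel_sorted, List.find?_map]
    rfl
  have hfold := foldl_eq_combine_bestR
    (fun k => PySem.Chars.isIn k (PySem.Chars.lower (PySem.Chars.strip name.toList)))
    tinyTable ([], [])
  simp only [tiny_abbr_py, tiny_abbr_py_alt, hn, hsr]
  by_cases h0 : PySem.Chars.lower (PySem.Chars.strip name.toList) = []
  · simp [h0]
  · rw [if_neg h0, if_neg h0]
    rw [hfold]
    cases hb : bestR (fun k => PySem.Chars.isIn k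
        (PySem.Chars.lower (PySem.Chars.strip name.toList))) tinyTable with
    | none =>
      rw [hb] at hkey
      have hfq : tinySortedTable.find? (fun kv =>
          PySem.Str.isIn kv.1 (PySem.Str.lower (PySem.Str.strip name))) = none := by
        cases h : tinySortedTable.find? (fun kv =>
            PySem.Str.isIn kv.1 (PySem.Str.lower (PySem.Str.strip name))) with
        | none => rfl
        | some kv => rw [h] at hkey; simp at hkey
      rw [hfq]
      simp only [tinyCombine, Option.map_none, Option.getD_none, ne_eq,
        not_true_eq_false, if_false]
      exact tail_eq _ _ (by simp [pysem, PySem.Str.slice, hjoin]) max_len _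
    | some b =>
      rw [hb] at hkey
      obtain ⟨hb1, hb2⟩ := tinyTable_entries_nonempty b (bestR_mem hb)
      cases h : tinySortedTable.find? (fun kv =>
          PySem.Str.isIn kv.1 (PySem.Str.lower (PySem.Str.strip name))) with
      | none => rw [h] at hkey; simp at hkey
      | some kv =>
        rw [h] at hkey
        simp only [Option.map_some, Option.some.injEq] at hkey
        have hkv2 : kv.2.toList = b.2 := by rw [← hkey]; rfl
        have hcomb : tinyCombine ([], []) (some b) = b := by
          simp [tinyCombine, List.length_pos_iff.mpr hb1]
        rw [hcomb, if_pos hb2]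
        simp only [Option.map_some, Option.getD_some]
        exact tail_eq _ _ (by simp [pysem, PySem.Str.slice, hkv2]) max_len _

-- ===== VERDICT (by name: the statement is the Claim_ definition above) =====
theorem tiny_abbr_py_spec : Claim_equal_tiny_abbr_py := by
  intro name max_len _
  unfold Spec_tiny_abbr_py
  exact core_eq name max_len
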